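-- pv_equiv track=rewrite | github.com/luizaugustoliveira/Algoritmos | Matrizes/soma_linha_coluna/soma.py | soma_linha_e_coluna
-- ===== SOURCE A (Python) =====
-- def soma_linha_e_coluna(matriz,l,c):
--     soma = 0
--     for i in range(len(matriz)):
--         for j in range(len(matriz[0])):
--                 if i == l:
--                     soma += matriz[i][j]
--
--                 if j == c:
--                     soma += matriz[i][j]
--
--     return soma
-- ===== SOURCE B (Python) =====
-- def soma_linha_e_coluna(matriz, l, c):
--     n = len(matriz)
--     m = len(matriz[0]) if matriz else 0  # column count of the matrix
--     soma = sum(matriz[l][:m]) if 0 <= l < n else 0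
--     if 0 <= c < m:
--         soma += sum(row[c] for row in matriz)
--     return soma
-- ===== Notes on version B (the rewrite author's own statement) =====
-- stated objective: faster
-- what changed: B sums row l directly (its first len(matriz[0]) entries, the matrix's column count) and column c directly, guarding out-of-range l/c which contribute nothing, instead of A's scan over every cell with per-cell index tests.
import Mathlib
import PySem

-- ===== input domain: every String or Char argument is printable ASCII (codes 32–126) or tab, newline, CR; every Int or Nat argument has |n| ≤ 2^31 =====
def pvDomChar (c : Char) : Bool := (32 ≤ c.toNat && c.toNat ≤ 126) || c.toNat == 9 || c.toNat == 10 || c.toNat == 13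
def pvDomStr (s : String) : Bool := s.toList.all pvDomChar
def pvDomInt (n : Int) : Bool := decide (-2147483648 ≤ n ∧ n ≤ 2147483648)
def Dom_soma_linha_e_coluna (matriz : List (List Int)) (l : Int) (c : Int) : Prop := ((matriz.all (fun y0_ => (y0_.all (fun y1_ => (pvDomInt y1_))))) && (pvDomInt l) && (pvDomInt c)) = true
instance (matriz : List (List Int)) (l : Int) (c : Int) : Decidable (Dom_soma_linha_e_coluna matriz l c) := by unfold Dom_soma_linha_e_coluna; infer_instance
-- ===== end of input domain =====

-- B sums row l and column c directly (O(rows+cols)) instead of A's scan of every cell (O(rows*cols)).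

-- ===== PORT A =====
def soma_linha_e_coluna (matriz : List (List Int)) (l : Int) (c : Int) : Int :=
  (PySem.List.pyRange 0 (PySem.List.len matriz) 1).foldl (fun soma i =>
    (PySem.List.pyRange 0 (PySem.List.len (PySem.List.pyGetD matriz 0 [])) 1).foldl (fun soma j =>
      let soma := if i == l then soma + PySem.List.pyGetD (PySem.List.pyGetD matriz i []) j 0 else soma
      if j == c then soma + PySem.List.pyGetD (PySem.List.pyGetD matriz i []) j 0 else soma) soma) 0

-- ===== PORT B =====
def soma_linha_e_coluna_alt (matriz : List (List Int)) (l : Int) (c : Int) : Int :=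
  let n : Int := PySem.List.len matriz
  let m : Int := PySem.List.len (PySem.List.pyGetD matriz 0 [])
  let soma : Int := if 0 ≤ l ∧ l < n then (PySem.List.slice (PySem.List.pyGetD matriz l []) none (some m)).sum else 0
  if 0 ≤ c ∧ c < m then soma + (matriz.map (fun row => PySem.List.pyGetD row c 0)).sum else soma

-- ===== PRECONDITION & SPEC =====
-- Pre_ excludes exactly the inputs where A raises IndexError: a row l (when 0 ≤ l < len(matriz))
-- shorter than row 0, and, when 0 ≤ c < len(matriz[0]), any row with no c-th element.
def Pre_soma_linha_e_coluna (matriz : List (List Int)) (l : Int) (c : Int) : Prop :=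
  ((0 ≤ l ∧ l < (matriz.length : Int)) → (matriz.headD []).length ≤ (PySem.List.pyGetD matriz l []).length) ∧
  ((0 ≤ c ∧ c < ((matriz.headD []).length : Int)) → ∀ row ∈ matriz, c < (row.length : Int))
instance (matriz : List (List Int)) (l : Int) (c : Int) : Decidable (Pre_soma_linha_e_coluna matriz l c) := by unfold Pre_soma_linha_e_coluna; infer_instance

def pvWitness_soma_linha_e_coluna : List (List Int) × Int × Int := ([[1, 2], [3, 4]], 0, 1)

def Spec_soma_linha_e_coluna (matriz : List (List Int)) (l : Int) (c : Int) (out : Int) : Prop := out = soma_linha_e_coluna_alt matriz l c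
instance (matriz : List (List Int)) (l : Int) (c : Int) (out : Int) : Decidable (Spec_soma_linha_e_coluna matriz l c out) := by unfold Spec_soma_linha_e_coluna; infer_instance

-- ===== CLAIM (what is proved, stated in full; the proofs are below) =====
def Claim_equal_soma_linha_e_coluna : Prop := ∀ (matriz : List (List Int)) (l : Int) (c : Int), Dom_soma_linha_e_coluna matriz l c → Pre_soma_linha_e_coluna matriz l c → Spec_soma_linha_e_coluna matriz l c (soma_linha_e_coluna matriz l c)

-- ===== LEMMAS AND PROOFS =====

-- Sum of 'if j == c then v j else 0' over range(m): the single term at c, if 0 ≤ c < m.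
theorem pv_sum_ite_idx (v : Int → Int) (c : Int) (m : Nat) :
    ((PySem.List.pyRange 0 (m : Int) 1).map (fun j => if j == c then v j else 0)).sum
      = if 0 ≤ c ∧ c < (m : Int) then v c else 0 := by
  induction m with
  | zero => simp [PySem.List.pyRange_one_eq_nil]
  | succ m ih =>
    have h : ((m : Int) + 1) = ((m + 1 : Nat) : Int) := by push_cast; ring
    rw [← h, PySem.List.pyRange_one_succ_right (by positivity)]
    rw [List.map_append, List.sum_append, ih]
    simp only [List.map_cons, List.map_nil, List.sum_cons, List.sum_nil, beq_iff_eq]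
    by_cases hc : (m : Int) = c
    · subst hc; simp
    · simp [hc]
      split_ifs with h1 h2 h2 <;> first | rfl | omega

-- Row entries indexed over range(m) are the row's first m entries (when m ≤ len row).
theorem pv_take_row (row : List Int) (m : Nat) (hm : m ≤ row.length) :
    (PySem.List.pyRange 0 (m : Int) 1).map (fun j => PySem.List.pyGetD row j 0) = row.take m := by
  induction m with
  | zero => simp [PySem.List.pyRange_one_eq_nil]
  | succ m ih =>
    have h : ((m : Int) + 1) = ((m + 1 : Nat) : Int) := by push_cast; ring
    rw [← h, PySem.List.pyRange_one_succ_right (by positivity)]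
    rw [List.map_append, ih (by omega), List.take_add_one]
    simp only [List.map_cons, List.map_nil]
    congr 1
    rw [PySem.List.pyGetD_eq_getElem row 0 (by positivity) (by exact_mod_cast hm)]
    simp [List.getElem?_eq_getElem (by omega : m < row.length)]

-- A's inner loop over one row of length m, with conditions accumulated as two closed terms.
theorem pv_inner (row : List Int) (i l c : Int) (s : Int) (m : Nat) :
    (PySem.List.pyRange 0 (m : Int) 1).foldl (fun soma j =>
        let soma := if i == l then soma + PySem.List.pyGetD row j 0 else soma
        if j == c then soma + PySem.List.pyGetD row j 0 else soma) s
      = s + ((if i == l then ((PySem.List.pyRange 0 (m : Int) 1).map (fun j => PySem.List.pyGetD row j 0)).sum else 0)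
             + (if 0 ≤ c ∧ c < (m : Int) then PySem.List.pyGetD row c 0 else 0)) := by
  have hstep : (fun (soma : Int) (j : Int) =>
        let soma := if i == l then soma + PySem.List.pyGetD row j 0 else soma
        if j == c then soma + PySem.List.pyGetD row j 0 else soma)
      = (fun soma j => soma + ((if i == l then PySem.List.pyGetD row j 0 else 0)
                               + (if j == c then PySem.List.pyGetD row j 0 else 0))) := by
    funext soma j
    by_cases h1 : i == l <;> by_cases h2 : j == c <;> simp [h1, h2] <;> ring
  rw [hstep, PySem.List.foldl_add]
  congr 1
  have hsplit : ((PySem.List.pyRange 0 (m : Int) 1).map (fun j =>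
        (if i == l then PySem.List.pyGetD row j 0 else 0)
        + (if j == c then PySem.List.pyGetD row j 0 else 0))).sum
      = ((PySem.List.pyRange 0 (m : Int) 1).map (fun j => if i == l then PySem.List.pyGetD row j 0 else 0)).sum
        + ((PySem.List.pyRange 0 (m : Int) 1).map (fun j => if j == c then PySem.List.pyGetD row j 0 else 0)).sum := by
    rw [← List.sum_map_add]
  rw [hsplit, pv_sum_ite_idx (fun j => PySem.List.pyGetD row j 0) c m]
  congr 1
  by_cases h1 : i == l <;> · simp [h1]

-- Column-sum lemma: summing row[c] over indexed rows equals the mapped column sum.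
theorem pv_col_sum (matriz : List (List Int)) (c : Int) :
    ((PySem.List.pyRange 0 ((matriz.length : Int)) 1).map
        (fun i => PySem.List.pyGetD (PySem.List.pyGetD matriz i []) c 0)).sum
      = (matriz.map (fun row => PySem.List.pyGetD row c 0)).sum := by
  have h := PySem.List.map_pyGetD_pyRange_zero matriz []
  simp only [PySem.List.len] at h
  calc ((PySem.List.pyRange 0 ((matriz.length : Int)) 1).map
          (fun i => PySem.List.pyGetD (PySem.List.pyGetD matriz i []) c 0)).sum
      = (((PySem.List.pyRange 0 ((matriz.length : Int)) 1).map
          (fun i => PySem.List.pyGetD matriz i [])).map (fun row => PySem.List.pyGetD row c 0)).sum := by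
        rw [List.map_map]; rfl
    _ = _ := by rw [h]

theorem pv_main (matriz : List (List Int)) (l c : Int)
    (hrect : (0 ≤ l ∧ l < (matriz.length : Int)) → (matriz.headD []).length ≤ (PySem.List.pyGetD matriz l []).length) :
    soma_linha_e_coluna matriz l c = soma_linha_e_coluna_alt matriz l c := by
  set m : Nat := (matriz.headD []).length with hm
  have hm0 : PySem.List.pyGetD matriz 0 [] = matriz.headD [] := by
    cases matriz with
    | nil => simp [PySem.List.pyGetD, PySem.List.pyGet?, PySem.List.pyIdx?]
    | cons x xs => simp [PySem.List.pyGetD_zero_cons, List.headD]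
  have hlen0 : PySem.List.len (PySem.List.pyGetD matriz 0 []) = (m : Int) := by
    rw [hm0, PySem.List.len_eq, hm]
  unfold soma_linha_e_coluna
  rw [hlen0]
  rw [PySem.List.foldl_congr_mem _ _
      (fun soma i => soma + ((if i == l then ((PySem.List.pyGetD matriz i []).take m).sum else 0)
          + (if 0 ≤ c ∧ c < (m : Int) then PySem.List.pyGetD (PySem.List.pyGetD matriz i []) c 0 else 0))) 0
      (by
        intro acc i hi
        rw [PySem.List.mem_pyRange_one] at hi
        have hlt : i < (matriz.length : Int) := by simpa [PySem.List.len_eq] using hi.2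
        rw [pv_inner (PySem.List.pyGetD matriz i []) i l c acc m]
        by_cases hil : i == l
        · have hil' : i = l := by simpa using hil
          subst hil'
          rw [pv_take_row (PySem.List.pyGetD matriz i []) m (hrect ⟨hi.1, hlt⟩)]
        · simp [hil])]
  rw [PySem.List.foldl_add]
  have hlen : PySem.List.len matriz = ((matriz.length : Nat) : Int) := by simp [PySem.List.len_eq]
  rw [hlen]
  rw [List.sum_map_add, pv_sum_ite_idx (fun i => ((PySem.List.pyGetD matriz i []).take m).sum) l matriz.length]
  have hsl : PySem.List.slice (PySem.List.pyGetD matriz l []) none (some ((m : Nat) : Int))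
      = (PySem.List.pyGetD matriz l []).take m := by
    exact PySem.List.slice_to_natCast _ m
  unfold soma_linha_e_coluna_alt
  simp only [PySem.List.len_eq]
  have hmm : (((PySem.List.pyGetD matriz 0 []).length : Nat) : Int) = (m : Int) := by rw [hm0, hm]
  rw [hmm, hsl]
  by_cases hc : 0 ≤ c ∧ c < (m : Int)
  · simp only [if_pos hc]
    rw [pv_col_sum matriz c]
    exact zero_add _
  · simp only [if_neg hc]
    simp

-- ===== VERDICT (by name: the statement is the Claim_ definition above) =====
theorem soma_linha_e_coluna_spec : Claim_equal_soma_linha_e_coluna := by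
  intro matriz l c _ hpre
  exact pv_main matriz l c hpre.1
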